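-- pv_equiv track=rewrite | github.com/eunzi-kim/TodayAlgorithm | Programmers/LV2/피로도.py | solution
-- ===== SOURCE A (Python) =====
-- import itertools
--
-- def solution(k, dungeons):
--     answer = 0
--
--     n = len(dungeons)
--     arr = [x for x in range(n)]
--
--     for w in itertools.permutations(arr, n):
--         tired = k
--         temp = 0
--         for i in w:
--             v = dungeons[i]
--             if v[0] <= tired:
--                 tired -= v[1]
--                 temp += 1
--
--         if temp > answer:
--             answer = temp
--
--     return answer
-- ===== SOURCE B (Python) =====
-- def solution(k, dungeons):
--     # DFS over "pick one affordable dungeon, recurse on the rest" instead of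
--     # enumerating all n! orders; prunes every unaffordable branch.
--     def picks(ds):
--         # all ways to pick one element: [(ds[i], ds without i) for each i]
--         if not ds:
--             return []
--         d, rest = ds[0], ds[1:]
--         return [(d, rest)] + [(x, [d] + r) for x, r in picks(rest)]
--
--     def best(f, ds):
--         res = 0
--         for d, rest in picks(ds):
--             if d[0] <= f:
--                 r = 1 + best(f - d[1], rest)
--                 if r > res:
--                     res = r
--         return res
--
--     return best(k, dungeons)
-- ===== Notes on version B (the rewrite author's own statement) =====
-- stated objective: alternative
-- what changed: Replaces A's exhaustive scan of all n! index permutations with a recursive DFS that at each step picks one still-affordable dungeon and recurses on the remaining list, pruning every unaffordable branch; Pre_ excludes inputs containing a dungeon record of length < 2 whose requirement the fatigue budget could ever reach (at most k plus all possible fatigue refunds), on which the Python code can raise IndexError; where A still happens to return on such an excluded input, B returns the same value.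
-- outside the precondition, e.g. on solution(0, [[40], [100, -50]]): A returns 0, B returns 0
import Mathlib
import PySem

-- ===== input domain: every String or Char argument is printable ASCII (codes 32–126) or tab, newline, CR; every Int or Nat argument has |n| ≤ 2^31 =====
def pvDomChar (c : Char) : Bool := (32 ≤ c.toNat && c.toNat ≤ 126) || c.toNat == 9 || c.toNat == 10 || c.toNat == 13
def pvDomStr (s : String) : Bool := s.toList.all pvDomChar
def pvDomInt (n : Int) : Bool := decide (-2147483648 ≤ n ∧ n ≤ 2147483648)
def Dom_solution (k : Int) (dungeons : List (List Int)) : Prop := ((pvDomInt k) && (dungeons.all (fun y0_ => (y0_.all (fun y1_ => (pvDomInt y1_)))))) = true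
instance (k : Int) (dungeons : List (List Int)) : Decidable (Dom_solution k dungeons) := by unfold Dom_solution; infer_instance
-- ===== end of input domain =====

-- B replaces A's enumeration of all n! orders by a pruned DFS that repeatedly picks one
-- affordable dungeon and recurses on the remaining list (objective: alternative).

-- ===== PORT A =====
def solution (k : Int) (dungeons : List (List Int)) : Int :=
  let n : Int := PySem.List.len dungeons
  let arr : List Int := PySem.List.pyRange 0 n 1
  (PySem.List.permutations arr dungeons.length).foldl
    (fun answer w =>
      let tt :=
        w.foldl
          (fun tt i =>
            let v := PySem.List.pyGetD dungeons i []
            if PySem.List.pyGetD v 0 0 ≤ tt.1 then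
              (tt.1 - PySem.List.pyGetD v 1 0, tt.2 + 1)
            else tt)
          (k, (0 : Int))
      if answer < tt.2 then tt.2 else answer)
    0

-- ===== PORT B =====
-- all ways to pick one element of ds: (ds[i], ds without position i), in index order
def picks {α : Type} (ds : List α) : List (α × List α) :=
  match ds with
  | [] => []
  | d :: rest => (d, rest) :: (picks rest).map (fun p => (p.1, d :: p.2))

-- needed by bestB's termination proof
theorem picks_len {α : Type} {ds : List α} {p : α × List α}
    (h : p ∈ picks ds) : p.2.length + 1 = ds.length := by
  induction ds generalizing p with
  | nil => simp [picks] at h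
  | cons d rest ih =>
    simp only [picks, List.mem_cons, List.mem_map] at h
    rcases h with h | ⟨q, hq, rfl⟩
    · subst h; simp
    · have := ih hq; simp at this ⊢; omega

def bestB (f : Int) (ds : List (List Int)) : Int :=
  (picks ds).attach.foldl
    (fun res x =>
      if PySem.List.pyGetD x.1.1 0 0 ≤ f then
        (if res < 1 + bestB (f - PySem.List.pyGetD x.1.1 1 0) x.1.2 then
          1 + bestB (f - PySem.List.pyGetD x.1.1 1 0) x.1.2
        else res)
      else res)
    0
termination_by ds.length
decreasing_by
  have := picks_len x.2; omega

def solution_alt (k : Int) (dungeons : List (List Int)) : Int :=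
  bestB k dungeons

-- ===== PRECONDITION & SPEC =====
-- upper bound on the total fatigue refund: the sum of -cost over the well-formed records
-- with a negative cost (fatigue can never exceed k plus this sum)
def negSum (dungeons : List (List Int)) : Int :=
  dungeons.foldl
    (fun s e => if 2 ≤ e.length ∧ PySem.List.pyGetD e 1 0 < 0 then s - PySem.List.pyGetD e 1 0 else s)
    0

-- Pre_ excludes inputs containing a dungeon record of length < 2 that the fatigue budget could
-- ever afford (its requirement is at most k plus every possible fatigue refund): there the Python
-- code can raise IndexError on d[0]/d[1]; a short record whose requirement provably can never be
-- met is harmless (it is only ever skipped) and stays inside Pre_.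
def Pre_solution (k : Int) (dungeons : List (List Int)) : Prop :=
  ∀ d ∈ dungeons, 2 ≤ d.length ∨
    (d.length = 1 ∧ k + negSum dungeons < PySem.List.pyGetD d 0 0)
instance (k : Int) (dungeons : List (List Int)) : Decidable (Pre_solution k dungeons) := by
  unfold Pre_solution; infer_instance

def pvWitness_solution : Int × List (List Int) := (80, [[80, 20], [50, 40], [30, 10]])

def Spec_solution (k : Int) (dungeons : List (List Int)) (out : Int) : Prop :=
  out = solution_alt k dungeons
instance (k : Int) (dungeons : List (List Int)) (out : Int) : Decidable (Spec_solution k dungeons out) := by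
  unfold Spec_solution; infer_instance

-- ===== CLAIM (what is proved, stated in full; the proofs are below) =====
def Claim_equal_solution : Prop :=
  ∀ (k : Int) (dungeons : List (List Int)), Dom_solution k dungeons →
    Pre_solution k dungeons → Spec_solution k dungeons (solution k dungeons)

-- ===== LEMMAS AND PROOFS =====

-- abbreviations for the dungeon fields as the ports read them
def req (d : List Int) : Int := PySem.List.pyGetD d 0 0
def cost (d : List Int) : Int := PySem.List.pyGetD d 1 0
def look (dungeons : List (List Int)) (i : Int) : List Int := PySem.List.pyGetD dungeons i []

-- the count A's inner loop produces on an order w of the dungeon records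
def g (f : Int) : List (List Int) → Int
  | [] => 0
  | d :: w => if req d ≤ f then 1 + g (f - cost d) w else g f w

theorem g_nonneg (f : Int) (w : List (List Int)) : 0 ≤ g f w := by
  induction w generalizing f with
  | nil => simp [g]
  | cons d w ih => simp only [g]; split <;> [linarith [ih (f - cost d)]; exact ih f]

-- ---- generic facts about the two fold-max shapes ----

theorem amax_init_le {σ : Type} (v : σ → Int) (l : List σ) (init : Int) :
    init ≤ l.foldl (fun a x => if a < v x then v x else a) init := by
  induction l generalizing init with
  | nil => simp
  | cons x l ih =>
    refine le_trans ?_ (ih (if init < v x then v x else init))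
    split <;> omega

theorem amax_ge {σ : Type} (v : σ → Int) (l : List σ) :
    ∀ (init : Int) {x : σ}, x ∈ l →
      v x ≤ l.foldl (fun a x => if a < v x then v x else a) init := by
  induction l with
  | nil => intro init x hx; simp at hx
  | cons y l ih =>
    intro init x hx
    rcases List.mem_cons.mp hx with rfl | hx
    · refine le_trans ?_ (amax_init_le v l (if init < v x then v x else init))
      split <;> omega
    · exact ih _ hx

theorem amax_cases {σ : Type} (v : σ → Int) (l : List σ) (init : Int) :
    l.foldl (fun a x => if a < v x then v x else a) init = init ∨
      ∃ x ∈ l, l.foldl (fun a x => if a < v x then v x else a) init = v x := by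
  induction l generalizing init with
  | nil => left; simp
  | cons y l ih =>
    simp only [List.foldl_cons]
    rcases ih (if init < v y then v y else init) with h | ⟨x, hx, h⟩
    · by_cases hc : init < v y
      · right; exact ⟨y, List.mem_cons_self, by simpa [hc] using h⟩
      · left; simpa [hc] using h
    · right; exact ⟨x, List.mem_cons_of_mem _ hx, h⟩

theorem bmax_init_le {σ : Type} (C : σ → Prop) [DecidablePred C] (v : σ → Int)
    (l : List σ) (init : Int) :
    init ≤ l.foldl (fun res x => if C x then (if res < v x then v x else res) else res) init := by
  induction l generalizing init with
  | nil => simp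
  | cons x l ih =>
    refine le_trans ?_ (ih _)
    dsimp only
    split
    · split <;> omega
    · omega

theorem bmax_ge {σ : Type} (C : σ → Prop) [DecidablePred C] (v : σ → Int)
    (l : List σ) : ∀ (init : Int) {x : σ}, x ∈ l → C x →
      v x ≤ l.foldl (fun res x => if C x then (if res < v x then v x else res) else res) init := by
  induction l with
  | nil => intro init x hx; simp at hx
  | cons y l ih =>
    intro init x hx hC
    rcases List.mem_cons.mp hx with rfl | hx
    · refine le_trans ?_ (bmax_init_le C v l _)
      dsimp only
      rw [if_pos hC]
      split <;> omega
    · exact ih _ hx hC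

theorem bmax_cases {σ : Type} (C : σ → Prop) [DecidablePred C] (v : σ → Int)
    (l : List σ) (init : Int) :
    l.foldl (fun res x => if C x then (if res < v x then v x else res) else res) init = init ∨
      ∃ x ∈ l, C x ∧
        l.foldl (fun res x => if C x then (if res < v x then v x else res) else res) init = v x := by
  induction l generalizing init with
  | nil => left; simp
  | cons y l ih =>
    simp only [List.foldl_cons]
    rcases ih (if C y then (if init < v y then v y else init) else init) with h | ⟨x, hx, hCx, h⟩
    · by_cases hc : C y
      · by_cases hlt : init < v y
        · right; exact ⟨y, List.mem_cons_self, hc, by simpa [hc, hlt] using h⟩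
        · left; simpa [hc, hlt] using h
      · left; simpa [hc] using h
    · right; exact ⟨x, List.mem_cons_of_mem _ hx, hCx, h⟩

-- ---- bestB's defining fold, read through the generic lemmas ----

theorem bestB_eq (f : Int) (ds : List (List Int)) :
    bestB f ds =
      (picks ds).attach.foldl
        (fun res x => if req x.1.1 ≤ f then
            (if res < 1 + bestB (f - cost x.1.1) x.1.2 then 1 + bestB (f - cost x.1.1) x.1.2 else res)
          else res) 0 := by
  conv_lhs => rw [bestB]
  simp only [req, cost]

theorem bestB_nonneg (f : Int) (ds : List (List Int)) : 0 ≤ bestB f ds := by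
  rw [bestB_eq]
  apply bmax_init_le

theorem bestB_ge {f : Int} {ds : List (List Int)} {d : List Int} {rest : List (List Int)}
    (h : (d, rest) ∈ picks ds) (hC : req d ≤ f) :
    1 + bestB (f - cost d) rest ≤ bestB f ds := by
  have h2 := bmax_ge (fun x : {p // p ∈ picks ds} => req x.1.1 ≤ f)
    (fun x => 1 + bestB (f - cost x.1.1) x.1.2) (picks ds).attach 0
    (List.mem_attach _ ⟨(d, rest), h⟩) hC
  dsimp only at h2
  conv_rhs => rw [bestB_eq]
  exact h2

theorem bestB_cases (f : Int) (ds : List (List Int)) :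
    bestB f ds = 0 ∨ ∃ d rest, (d, rest) ∈ picks ds ∧ req d ≤ f ∧
      bestB f ds = 1 + bestB (f - cost d) rest := by
  rcases bmax_cases (fun x => req x.1.1 ≤ f) (fun x => 1 + bestB (f - cost x.1.1) x.1.2)
      (picks ds).attach 0 with h | ⟨x, _, hC, h⟩
  · exact Or.inl (by rw [bestB_eq]; exact h)
  · exact Or.inr ⟨x.1.1, x.1.2, x.2, hC, by rw [bestB_eq]; exact h⟩

-- ---- structural facts about picks ----

theorem perm_of_mem_picks {α : Type} {ds : List α} {p : α × List α}
    (h : p ∈ picks ds) : (p.1 :: p.2).Perm ds := by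
  induction ds generalizing p with
  | nil => simp [picks] at h
  | cons d rest ih =>
    simp only [picks, List.mem_cons, List.mem_map] at h
    rcases h with h | ⟨q, hq, rfl⟩
    · subst h; exact List.Perm.refl _
    · exact (List.Perm.swap d q.1 q.2).trans ((ih hq).cons d)

theorem picks_cons_mem {α : Type} {d x : α} {rest r : List α}
    (h : (x, r) ∈ picks rest) : (x, d :: r) ∈ picks (d :: rest) := by
  simp only [picks, List.mem_cons, List.mem_map]
  exact Or.inr ⟨(x, r), h, rfl⟩

theorem mem_picks_of_mem {α : Type} [BEq α] [LawfulBEq α] {a : α} {ds : List α} (h : a ∈ ds) :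
    (a, ds.erase a) ∈ picks ds := by
  induction ds with
  | nil => simp at h
  | cons d rest ih =>
    by_cases hd : d = a
    · subst hd
      simp [picks, List.erase_cons_head]
    · rcases List.mem_cons.mp h with rfl | h
      · exact absurd rfl hd
      · have he : (d :: rest).erase a = d :: rest.erase a := by
          simp [hd]
        rw [he]
        exact picks_cons_mem (ih h)

theorem picks_map {α β : Type} (f : α → β) (xs : List α) :
    picks (xs.map f) = (picks xs).map (fun p => (f p.1, p.2.map f)) := by
  induction xs with
  | nil => simp [picks]
  | cons x xs ih =>
    simp only [List.map_cons, picks, ih, List.map_map]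
    congr 1

-- ---- bestB is monotone under adding a dungeon, and invariant under permutation ----

theorem bestB_mono_cons : ∀ n (ds : List (List Int)), ds.length = n →
    ∀ (f : Int) (d : List Int), bestB f ds ≤ bestB f (d :: ds) := by
  intro n
  induction n using Nat.strong_induction_on with
  | _ n ih =>
    intro ds hn f d
    rcases bestB_cases f ds with h | ⟨x, r, hmem, hC, h⟩
    · rw [h]; exact bestB_nonneg _ _
    · have hr : r.length + 1 = ds.length := picks_len hmem
      have h1 : bestB (f - cost x) r ≤ bestB (f - cost x) (d :: r) :=
        ih r.length (by omega) r rfl (f - cost x) d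
      have h2 : 1 + bestB (f - cost x) (d :: r) ≤ bestB f (d :: ds) :=
        bestB_ge (picks_cons_mem hmem) hC
      omega

theorem bestB_le_of_perm : ∀ n (ds ds' : List (List Int)), ds.length = n →
    ds.Perm ds' → ∀ f, bestB f ds ≤ bestB f ds' := by
  intro n
  induction n using Nat.strong_induction_on with
  | _ n ih =>
    intro ds ds' hn hperm f
    rcases bestB_cases f ds with h | ⟨x, r, hmem, hC, h⟩
    · rw [h]; exact bestB_nonneg _ _
    · have hr : r.length + 1 = ds.length := picks_len hmem
      have hxr : (x :: r).Perm ds' := (perm_of_mem_picks hmem).trans hperm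
      have hx' : x ∈ ds' := hxr.subset List.mem_cons_self
      have hre : r.Perm (ds'.erase x) :=
        (hxr.trans (List.perm_cons_erase hx')).cons_inv
      have h1 : bestB (f - cost x) r ≤ bestB (f - cost x) (ds'.erase x) :=
        ih r.length (by omega) r _ rfl hre _
      have h2 : 1 + bestB (f - cost x) (ds'.erase x) ≤ bestB f ds' :=
        bestB_ge (mem_picks_of_mem hx') hC
      omega

theorem bestB_perm {ds ds' : List (List Int)} (h : ds.Perm ds') (f : Int) :
    bestB f ds = bestB f ds' :=
  le_antisymm (bestB_le_of_perm ds.length ds ds' rfl h f)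
    (bestB_le_of_perm ds'.length ds' ds rfl h.symm f)

-- ---- upper bound: any order's greedy count is at most bestB ----

theorem g_le_bestB : ∀ (w ds : List (List Int)), w.Perm ds → ∀ f, g f w ≤ bestB f ds := by
  intro w
  induction w with
  | nil =>
    intro ds h f
    have : g f [] = 0 := rfl
    rw [this]
    exact bestB_nonneg _ _
  | cons d w ih =>
    intro ds h f
    rw [← bestB_perm h f]
    by_cases hC : req d ≤ f
    · have h1 : g (f - cost d) w ≤ bestB (f - cost d) w := ih w (List.Perm.refl _) _
      have h2 : 1 + bestB (f - cost d) w ≤ bestB f (d :: w) :=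
        bestB_ge (by simp [picks]) hC
      simp only [g, if_pos hC]
      omega
    · have h1 : g f w ≤ bestB f w := ih w (List.Perm.refl _) _
      have h2 : bestB f w ≤ bestB f (d :: w) := bestB_mono_cons w.length w rfl f d
      simp only [g, if_neg hC]
      omega

-- ---- lower bound: some order of the indices achieves bestB ----

theorem bestB_le_g : ∀ n (idxs : List Int), idxs.length = n → ∀ (L : List (List Int)) (f : Int),
    ∃ u : List Int, u.Perm idxs ∧ bestB f (idxs.map (look L)) ≤ g f (u.map (look L)) := by
  intro n
  induction n using Nat.strong_induction_on with
  | _ n ih =>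
    intro idxs hn L f
    rcases bestB_cases f (idxs.map (look L)) with h | ⟨d, rest, hmem, hC, h⟩
    · exact ⟨idxs, List.Perm.refl _, h ▸ g_nonneg _ _⟩
    · rw [picks_map] at hmem
      rcases List.mem_map.mp hmem with ⟨⟨a, r⟩, hq, heq⟩
      injection heq with hd hrest
      subst hd
      subst hrest
      dsimp only at hmem hC h
      have hrlen : r.length + 1 = idxs.length := picks_len hq
      obtain ⟨u', hu'perm, hu'⟩ := ih r.length (by omega) r rfl L (f - cost (look L a))
      refine ⟨a :: u', ((hu'perm.cons a).trans (perm_of_mem_picks hq)), ?_⟩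
      have hg : g f ((a :: u').map (look L)) = 1 + g (f - cost (look L a)) (u'.map (look L)) := by
        simp only [List.map_cons, g, if_pos hC]
      rw [hg, h]
      omega

-- ---- every permutation of xs is listed by PySem.List.permutations xs (len xs) ----

theorem mem_permutations_of_perm {α : Type} [DecidableEq α] :
    ∀ (p xs : List α), p.Perm xs → p ∈ PySem.List.permutations xs xs.length := by
  intro p
  induction p with
  | nil =>
    intro xs h
    rw [(h.symm.eq_nil : xs = [])]
    simp [PySem.List.permutations_zero]
  | cons a p ih =>
    intro xs h
    have ha : a ∈ xs := h.subset List.mem_cons_self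
    have hidx : xs.idxOf a < xs.length := List.idxOf_lt_length_of_mem ha
    have hlen : xs.length = p.length + 1 := by
      have := h.length_eq; simp at this; omega
    have hperase : p.Perm (xs.erase a) := (h.trans (List.perm_cons_erase ha)).cons_inv
    have hlenerase : (xs.erase a).length = p.length := by
      rw [List.length_erase_of_mem ha]; omega
    have hmem : p ∈ PySem.List.permutations (xs.erase a) (xs.erase a).length := ih _ hperase
    rw [hlen, PySem.List.permutations_succ]
    rw [List.mem_flatMap]
    refine ⟨xs.idxOf a, List.mem_range.mpr hidx, ?_⟩
    rw [List.getElem?_eq_getElem hidx, List.getElem_idxOf hidx]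
    simp only [List.eraseIdx_idxOf_eq_erase]
    rw [hlenerase] at hmem
    exact List.mem_map.mpr ⟨p, hmem, rfl⟩

-- ---- A's inner loop computes g ----

theorem inner_snd (L : List (List Int)) :
    ∀ (w : List Int) (t c : Int),
      (w.foldl
        (fun tt i =>
          let v := PySem.List.pyGetD L i []
          if PySem.List.pyGetD v 0 0 ≤ tt.1 then
            (tt.1 - PySem.List.pyGetD v 1 0, tt.2 + 1)
          else tt)
        (t, c)).2 = c + g t (w.map (look L)) := by
  intro w
  induction w with
  | nil => intro t c; simp [g]
  | cons i w ih =>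
    intro t c
    simp only [List.foldl_cons, List.map_cons, g]
    by_cases hC : req (look L i) ≤ t
    · have hC' : PySem.List.pyGetD (PySem.List.pyGetD L i []) 0 0 ≤ t := hC
      simp only [if_pos hC', if_pos hC, ih]
      have hc : g (t - PySem.List.pyGetD (PySem.List.pyGetD L i []) 1 0) (w.map (look L)) =
          g (t - cost (look L i)) (w.map (look L)) := rfl
      rw [hc]
      omega
    · have hC' : ¬ PySem.List.pyGetD (PySem.List.pyGetD L i []) 0 0 ≤ t := hC
      simp only [if_neg hC', if_neg hC, ih]

-- ---- main equivalence ----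

theorem solution_eq_alt (k : Int) (dungeons : List (List Int)) :
    solution k dungeons = solution_alt k dungeons := by
  unfold solution solution_alt
  set arr : List Int := PySem.List.pyRange 0 (PySem.List.len dungeons) 1 with harr
  have hmap : arr.map (look dungeons) = dungeons := by
    rw [harr]
    have hl : PySem.List.len dungeons = (dungeons.length : Int) := by
      simp [PySem.List.len]
    rw [hl]
    exact PySem.List.map_pyGetD_pyRange_zero' dungeons []
  have harrlen : arr.length = dungeons.length := by
    have := congrArg List.length hmap
    simpa using this
  -- rewrite A's outer fold body into the amax shape with v w = g k (w.map (look dungeons))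
  have hbody :
      (fun (answer : Int) (w : List Int) =>
        let tt :=
          w.foldl
            (fun tt i =>
              let v := PySem.List.pyGetD dungeons i []
              if PySem.List.pyGetD v 0 0 ≤ tt.1 then
                (tt.1 - PySem.List.pyGetD v 1 0, tt.2 + 1)
              else tt)
            (k, (0 : Int))
        if answer < tt.2 then tt.2 else answer) =
      (fun (answer : Int) (w : List Int) =>
        if answer < g k (w.map (look dungeons)) then g k (w.map (look dungeons)) else answer) := by
    funext answer w
    have hi := inner_snd dungeons w k 0
    simp only [] at hi ⊢
    rw [hi]
    norm_num
  rw [hbody]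
  apply le_antisymm
  · rcases amax_cases (fun w : List Int => g k (w.map (look dungeons)))
        (PySem.List.permutations arr dungeons.length) 0 with h | ⟨w, hw, h⟩
    · rw [h]; exact bestB_nonneg _ _
    · rw [h]
      rw [← harrlen] at hw
      have hperm : w.Perm arr := PySem.List.perm_of_mem_permutations hw
      have hp : (w.map (look dungeons)).Perm (arr.map (look dungeons)) :=
        hperm.map (look dungeons)
      rw [hmap] at hp
      exact g_le_bestB _ _ hp k
  · obtain ⟨u, huperm, hu⟩ := bestB_le_g arr.length arr rfl dungeons k
    have humem : u ∈ PySem.List.permutations arr arr.length :=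
      mem_permutations_of_perm u arr huperm
    rw [harrlen] at humem
    rw [hmap] at hu
    exact le_trans hu
      (amax_ge (fun w : List Int => g k (w.map (look dungeons)))
        (PySem.List.permutations arr dungeons.length) 0 humem)

-- ===== VERDICT (by name: the statement is the Claim_ definition above) =====
theorem solution_spec : Claim_equal_solution := by
  intro k dungeons _ _
  unfold Spec_solution
  exact solution_eq_alt k dungeons
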